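-- pv_equiv track=rewrite | github.com/jdnewmil/aocpy | aocpy/aoc2024/day11.py | blink1b
-- ===== SOURCE A (Python) =====
-- from typing import Callable, TypeAlias
--
-- StoneBlink: TypeAlias = list[int]
--
-- def int2digits(i: int) -> list[int]:
--     result = []
--     while 9 < i:
--         result.append(i % 10)
--         i = i // 10
--     result.append(i)
--     return result
--
-- def blink1b(i: int) -> StoneBlink:
--     if 0 == i:
--         return [1]
--     else:
--         digits = int2digits(i)
--         n = len(digits)
--         if n % 2:
--             return [i * 2024]
--         n2 = n // 2 - 1
--         result1 = 0
--         for k in range(n - 1, n2, -1):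
--             result1 = 10 * result1 + digits[k]
--         result2 = 0
--         for k in range(n2, -1, -1):
--             result2 = 10 * result2 + digits[k]
--         return [result1, result2]
-- ===== SOURCE B (Python) =====
-- def blink1b(i: int) -> list[int]:
--     if i == 0:
--         return [1]
--     n = 1
--     t = i
--     while t >= 10:
--         t //= 10
--         n += 1
--     if n % 2:
--         return [i * 2024]
--     p = 10 ** (n // 2)
--     return [i // p, i % p]
-- ===== Notes on version B (the rewrite author's own statement) =====
-- stated objective: simpler
-- what changed: B never builds the digit list: it counts digits with an integer division loop and replaces A's two index-driven digit-reconstruction loops by a single divmod split at the half-power of ten.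
import Mathlib
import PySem

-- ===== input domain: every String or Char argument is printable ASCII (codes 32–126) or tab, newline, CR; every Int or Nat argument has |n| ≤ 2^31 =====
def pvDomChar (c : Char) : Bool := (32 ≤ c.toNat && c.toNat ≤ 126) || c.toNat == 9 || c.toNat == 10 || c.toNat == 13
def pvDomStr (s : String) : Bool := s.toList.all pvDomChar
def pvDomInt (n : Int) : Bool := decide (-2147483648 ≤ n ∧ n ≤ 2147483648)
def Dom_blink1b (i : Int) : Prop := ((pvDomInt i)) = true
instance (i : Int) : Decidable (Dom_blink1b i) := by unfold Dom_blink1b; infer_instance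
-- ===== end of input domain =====

-- B replaces A's digit-list construction and two digit-reconstruction loops by a
-- digit-count loop and a single divmod split (simpler; no list is materialized).

-- ===== PORT A =====
def int2digits (i : Int) : List Int :=
  if 9 < i then
    PySem.Int.mod i 10 :: int2digits (PySem.Int.floordiv i 10)
  else [i]
termination_by i.toNat
decreasing_by
  have h10 : PySem.Int.floordiv i 10 = i / 10 :=
    PySem.Int.floordiv_eq_ediv_of_pos (by omega)
  rw [h10]; omega

def blink1b (i : Int) : List Int :=
  if 0 = i then [1]
  else
    let digits := int2digits i
    let n : Int := digits.length
    if PySem.Int.mod n 2 ≠ 0 then [i * 2024]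
    else
      let n2 := PySem.Int.floordiv n 2 - 1
      let result1 := (PySem.List.pyRange (n - 1) n2 (-1)).foldl
        (fun r k => 10 * r + PySem.List.pyGetD digits k 0) 0
      let result2 := (PySem.List.pyRange n2 (-1) (-1)).foldl
        (fun r k => 10 * r + PySem.List.pyGetD digits k 0) 0
      [result1, result2]

-- ===== PORT B =====
def pvCountDigits (t : Int) (n : Int) : Int :=
  if 10 ≤ t then pvCountDigits (PySem.Int.floordiv t 10) (n + 1) else n
termination_by t.toNat
decreasing_by
  have h10 : PySem.Int.floordiv t 10 = t / 10 :=
    PySem.Int.floordiv_eq_ediv_of_pos (by omega)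
  rw [h10]; omega

def blink1b_alt (i : Int) : List Int :=
  if i = 0 then [1]
  else
    let n := pvCountDigits i 1
    if PySem.Int.mod n 2 ≠ 0 then [i * 2024]
    else
      let p : Int := 10 ^ (PySem.Int.floordiv n 2).toNat
      [PySem.Int.floordiv i p, PySem.Int.mod i p]

-- ===== PRECONDITION & SPEC =====
def Spec_blink1b (i : Int) (out : List Int) : Prop := out = blink1b_alt i
instance (i : Int) (out : List Int) : Decidable (Spec_blink1b i out) := by unfold Spec_blink1b; infer_instance

-- ===== CLAIM (what is proved, stated in full; the proofs are below) =====
def Claim_equal_blink1b : Prop := ∀ (i : Int), Dom_blink1b i → Spec_blink1b i (blink1b i)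

-- ===== LEMMAS AND PROOFS =====

-- little-endian value of a digit list
def pvVal (l : List Int) : Int := l.foldr (fun x acc => x + 10 * acc) 0

theorem pvVal_nil : pvVal [] = 0 := rfl

theorem pvVal_cons (x : Int) (l : List Int) : pvVal (x :: l) = x + 10 * pvVal l := rfl

theorem pvVal_append (l1 l2 : List Int) :
    pvVal (l1 ++ l2) = pvVal l1 + 10 ^ l1.length * pvVal l2 := by
  induction l1 with
  | nil => simp [pvVal_nil]
  | cons x t ih =>
      simp only [List.cons_append, pvVal_cons, ih, List.length_cons]
      ring

theorem int2digits_of_le (i : Int) (h : i ≤ 9) : int2digits i = [i] := by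
  rw [int2digits]; simp [show ¬ 9 < i by omega]

theorem int2digits_of_gt (i : Int) (h : 9 < i) :
    int2digits i = PySem.Int.mod i 10 :: int2digits (PySem.Int.floordiv i 10) := by
  rw [int2digits]; simp [h]

theorem int2digits_val (i : Int) (h : 0 ≤ i) : pvVal (int2digits i) = i := by
  induction i using int2digits.induct with
  | case1 i h9 ih =>
      rw [int2digits_of_gt i h9, pvVal_cons,
        PySem.Int.floordiv_eq_ediv_of_pos (a := i) (by omega),
        PySem.Int.mod_eq_emod_of_pos (a := i) (by omega)] at *
      rw [ih (by omega)]
      omega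
  | case2 i h9 =>
      rw [int2digits_of_le i (by omega), pvVal_cons, pvVal_nil]
      ring

theorem int2digits_bounds (i : Int) (h : 0 ≤ i) :
    ∀ x ∈ int2digits i, 0 ≤ x ∧ x < 10 := by
  induction i using int2digits.induct with
  | case1 i h9 ih =>
      rw [int2digits_of_gt i h9]
      intro x hx
      rcases List.mem_cons.mp hx with rfl | hx
      · rw [PySem.Int.mod_eq_emod_of_pos (a := i) (by omega)]
        omega
      · exact ih (by rw [PySem.Int.floordiv_eq_ediv_of_pos (a := i) (by omega)]; omega) x hx
  | case2 i h9 =>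
      rw [int2digits_of_le i (by omega)]
      intro x hx
      simp at hx
      omega

theorem pvVal_bounds (l : List Int) (h : ∀ x ∈ l, 0 ≤ x ∧ x < 10) :
    0 ≤ pvVal l ∧ pvVal l < 10 ^ l.length := by
  induction l with
  | nil => simp [pvVal_nil]
  | cons x t ih =>
      have hx := h x (by simp)
      have ht := ih (fun y hy => h y (by simp [hy]))
      rw [pvVal_cons]
      constructor
      · omega
      · have : (10:Int) ^ (x :: t).length = 10 * 10 ^ t.length := by
          rw [List.length_cons, pow_succ]; ring
        omega

theorem pvCountDigits_len (i : Int) :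
    ∀ n : Int, pvCountDigits i n = n + (int2digits i).length - 1 := by
  induction i using int2digits.induct with
  | case1 i h9 ih =>
      intro n
      rw [pvCountDigits, if_pos (by omega), int2digits_of_gt i h9, ih]
      simp; omega
  | case2 i h9 =>
      intro n
      rw [pvCountDigits, if_neg (by omega), int2digits_of_le i (by omega)]
      simp

-- the descending reconstruction loop computes the value of a digit segment
theorem pvFold_segment (d : List Int) (c : Nat) :
    ∀ (lo : Nat) (r0 : Int), lo + c ≤ d.length →
    (PySem.List.pyRange ((lo : Int) + c - 1) ((lo : Int) - 1) (-1)).foldl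
        (fun r k => 10 * r + PySem.List.pyGetD d k 0) r0
      = r0 * 10 ^ c + pvVal ((d.drop lo).take c) := by
  induction c with
  | zero =>
      intro lo r0 _
      rw [PySem.List.pyRange_neg_one_eq_nil (by omega)]
      simp [pvVal_nil]
  | succ c ih =>
      intro lo r0 hlen
      rw [show ((lo : Int) + (c + 1 : Nat) - 1) = (lo : Int) + c by push_cast; ring,
        PySem.List.pyRange_neg_one_cons (by omega)]
      simp only [List.foldl_cons]
      have := ih lo (10 * r0 + PySem.List.pyGetD d ((lo : Int) + c) 0) (by omega)
      rw [this]
      have hidx : (lo + c) < d.length := by omega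
      have hget : PySem.List.pyGetD d ((lo : Int) + c) 0 = d[lo + c] := by
        rw [show ((lo : Int) + c) = ((lo + c : Nat) : Int) by push_cast; ring,
          PySem.List.pyGetD_natCast]
        exact List.getD_eq_getElem d 0 hidx
      have htake : (d.drop lo).take (c + 1) = (d.drop lo).take c ++ [d[lo + c]] := by
        rw [List.take_add_one]
        congr 1
        have : (d.drop lo)[c]? = some d[lo + c] := by
          rw [List.getElem?_drop]
          exact List.getElem?_eq_getElem hidx
        simp [this]
      rw [htake, pvVal_append, hget]
      have hlentake : ((d.drop lo).take c).length = c := by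
        simp; omega
      rw [hlentake, pvVal_cons, pvVal_nil]
      ring

-- ===== VERDICT (by name: the statement is the Claim_ definition above) =====
theorem blink1b_spec : Claim_equal_blink1b := by
  intro i _
  unfold Spec_blink1b blink1b blink1b_alt
  by_cases h0 : i = 0
  · simp [h0]
  · rw [if_neg (by omega), if_neg h0]
    have hcnt : pvCountDigits i 1 = ((int2digits i).length : Int) := by
      rw [pvCountDigits_len]; omega
    rw [hcnt]
    by_cases hodd : PySem.Int.mod ((int2digits i).length : Int) 2 ≠ 0
    · rw [if_pos hodd, if_pos hodd]
    · rw [if_neg hodd, if_neg hodd]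
      -- even number of digits forces i ≥ 10
      have hi10 : 10 ≤ i := by
        by_contra hlt
        have : int2digits i = [i] := int2digits_of_le i (by omega)
        rw [this] at hodd
        simp [PySem.Int.mod] at hodd
      have hi0 : (0:Int) ≤ i := by omega
      set d := int2digits i with hd
      set n : Int := (d.length : Int) with hn
      have hmod2 : n % 2 = 0 := by
        rwa [PySem.Int.mod_eq_emod_of_pos (by omega), not_not] at hodd
      have hfd2 : PySem.Int.floordiv n 2 = n / 2 :=
        PySem.Int.floordiv_eq_ediv_of_pos (by omega)
      set m : Nat := d.length / 2 with hm
      have hmn : (m : Int) = n / 2 := by omega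
      have hlen2 : d.length = m + m := by omega
      -- the two loops
      have h1 := pvFold_segment d m m 0 (by omega)
      have h2 := pvFold_segment d m 0 0 (by omega)
      simp only [Nat.cast_zero, zero_add, zero_sub, List.drop_zero] at h2
      have hr1 : (PySem.List.pyRange (n - 1) (PySem.Int.floordiv n 2 - 1) (-1)).foldl
          (fun r k => 10 * r + PySem.List.pyGetD d k 0) 0 = pvVal (d.drop m) := by
        rw [hfd2, show n - 1 = (m : Int) + m - 1 by omega,
          show n / 2 - 1 = (m : Int) - 1 by omega, h1]
        have ht : (List.drop m d).take m = List.drop m d :=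
          List.take_of_length_le (by simp [hlen2])
        rw [ht]; ring
      have hr2 : (PySem.List.pyRange (PySem.Int.floordiv n 2 - 1) (-1) (-1)).foldl
          (fun r k => 10 * r + PySem.List.pyGetD d k 0) 0 = pvVal (d.take m) := by
        rw [hfd2, show n / 2 - 1 = (m : Int) - 1 by omega, h2]
        ring
      dsimp only []
      rw [hr1, hr2]
      -- divmod identities
      have hsplit : i = pvVal (d.take m) + 10 ^ m * pvVal (d.drop m) := by
        have hv := int2digits_val i hi0
        rw [← hd] at hv
        conv_lhs => rw [← hv, ← List.take_append_drop m d]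
        rw [pvVal_append]
        congr 2
        simp [hlen2]
      have hb := int2digits_bounds i hi0
      rw [← hd] at hb
      have hlow := pvVal_bounds (d.take m) (fun x hx => hb x (List.mem_of_mem_take hx))
      have hlowlen : ((d.take m).length) = m := by simp [hlen2]
      rw [hlowlen] at hlow
      have hp : PySem.Int.floordiv n 2 = (m : Int) := by rw [hfd2]; omega
      rw [hp]
      have hpnat : ((m : Int)).toNat = m := by simp
      rw [hpnat]
      have hpow : (0:Int) < 10 ^ m := by positivity
      rw [PySem.Int.floordiv_eq_ediv_of_pos hpow, PySem.Int.mod_eq_emod_of_pos hpow]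
      have hdiv : i / 10 ^ m = pvVal (d.drop m) := by
        rw [hsplit]
        rw [Int.add_mul_ediv_left _ _ (by positivity), Int.ediv_eq_zero_of_lt hlow.1 hlow.2]
        ring
      have hmod : i % 10 ^ m = pvVal (d.take m) := by
        rw [hsplit, Int.add_mul_emod_self_left, Int.emod_eq_of_lt hlow.1 hlow.2]
      rw [hdiv, hmod]
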